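-- pv_equiv track=rewrite | github.com/alex4321/bitlinear | bitlinear/bitlinear/basic.py | _get_parameter_count_per_n_bits
-- ===== SOURCE A (Python) =====
-- def _get_parameter_count_per_n_bits(n: int) -> int:
--     i = 0
--     while True:
--         j = i + 1
--         if 3 ** j > 2 ** n:
--             break
--         i += 1
--     return i
-- ===== SOURCE B (Python) =====
-- def _get_parameter_count_per_n_bits(n: int) -> int:
--     # binary search for the largest i with 3**i <= 2**n
--     if n < 2:
--         return 0
--     p = 1 << n
--     lo, hi = 0, n  # invariant: 3**lo <= 2**n < 3**hi
--     while hi - lo > 1: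
--         mid = (lo + hi) // 2
--         if 3 ** mid <= p:
--             lo = mid
--         else:
--             hi = mid
--     return lo
-- ===== Notes on version B (the rewrite author's own statement) =====
-- stated objective: faster
-- what changed: Replaced A's linear while-loop (which recomputes the bignum powers 3**j and 2**n on every iteration) by a binary search over the exponent with 2**n computed once, returning the largest i with 3**i <= 2**n.
import Mathlib
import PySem

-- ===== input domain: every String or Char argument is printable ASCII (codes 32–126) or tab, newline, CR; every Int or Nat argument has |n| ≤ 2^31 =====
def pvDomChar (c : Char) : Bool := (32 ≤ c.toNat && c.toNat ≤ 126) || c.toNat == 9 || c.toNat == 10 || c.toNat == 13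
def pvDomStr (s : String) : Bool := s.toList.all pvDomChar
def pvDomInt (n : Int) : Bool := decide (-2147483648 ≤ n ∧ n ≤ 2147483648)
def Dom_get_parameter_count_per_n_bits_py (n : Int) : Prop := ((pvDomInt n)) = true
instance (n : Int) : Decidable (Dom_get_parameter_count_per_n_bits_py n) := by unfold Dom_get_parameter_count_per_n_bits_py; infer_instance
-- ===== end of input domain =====

-- B replaces A's linear scan over the exponent by a binary search with 2**n computed once (measured faster).

-- ===== PORT A =====
-- A's `while True` loop; the counter i starts at 0 and only increments, so it is a Nat here.
-- Python's `2 ** n` is an exact float (a power of two) when n < 0 and an int otherwise, and the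
-- comparison `3 ** j > 2 ** n` is exact in both cases; it is modelled exactly by the ℚ zpow comparison.
def pvA_loop (n : Int) (i : Nat) : Int :=
  let j : Int := (i : Int) + 1
  if (3 : ℚ) ^ j > (2 : ℚ) ^ n then (i : Int)
  else pvA_loop n (i + 1)
termination_by (n - i).toNat
decreasing_by
  rename_i h
  have hle : (3 : ℚ) ^ ((i : Int) + 1) ≤ (2 : ℚ) ^ n := not_lt.mp h
  have h23 : (2 : ℚ) ^ ((i : Int) + 1) ≤ (3 : ℚ) ^ ((i : Int) + 1) := by
    have : ((i : Int) + 1) = ((i + 1 : ℕ) : ℤ) := by push_cast; ring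
    rw [this, zpow_natCast, zpow_natCast]
    exact pow_le_pow_left₀ (by norm_num) (by norm_num) _
  have h2 : (2 : ℚ) ^ ((i : Int) + 1) ≤ (2 : ℚ) ^ n := le_trans h23 hle
  have hin : (i : Int) + 1 ≤ n := (zpow_le_zpow_iff_right₀ (by norm_num : (1:ℚ) < 2)).mp h2
  omega

def get_parameter_count_per_n_bits_py (n : Int) : Int := pvA_loop n 0

-- ===== PORT B =====
-- Source B's binary-search loop; after the `if n < 2` guard all of lo, hi, mid, n are nonnegative,
-- so they are Nats here and `(lo + hi) // 2` is Nat division (= Python floor division on these inputs).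
def pvB_go (p : Nat) (lo hi : Nat) : Nat :=
  if hi - lo > 1 then
    let mid := (lo + hi) / 2
    if 3 ^ mid ≤ p then pvB_go p mid hi
    else pvB_go p lo mid
  else lo
termination_by hi - lo
decreasing_by all_goals omega

def get_parameter_count_per_n_bits_py_alt (n : Int) : Int :=
  if n < 2 then 0
  else
    let p : Nat := 2 ^ n.toNat   -- 1 << n
    (pvB_go p 0 n.toNat : Int)

-- ===== PRECONDITION & SPEC =====
def Spec_get_parameter_count_per_n_bits_py (n : Int) (out : Int) : Prop := out = get_parameter_count_per_n_bits_py_alt n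
instance (n : Int) (out : Int) : Decidable (Spec_get_parameter_count_per_n_bits_py n out) := by unfold Spec_get_parameter_count_per_n_bits_py; infer_instance

-- ===== CLAIM (what is proved, stated in full; the proofs are below) =====
def Claim_equal_get_parameter_count_per_n_bits_py : Prop := ∀ (n : Int), Dom_get_parameter_count_per_n_bits_py n → Spec_get_parameter_count_per_n_bits_py n (get_parameter_count_per_n_bits_py n)

-- ===== LEMMAS AND PROOFS =====

-- the answer for n ≥ 2 is the unique r with 3^r ≤ 2^N < 3^(r+1)
theorem pv_uniq (p a b : ℕ) (ha1 : 3 ^ a ≤ p) (ha2 : p < 3 ^ (a + 1))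
    (hb1 : 3 ^ b ≤ p) (hb2 : p < 3 ^ (b + 1)) : a = b := by
  have h1 : a < b + 1 := by
    have := lt_of_le_of_lt ha1 hb2
    exact (Nat.pow_lt_pow_iff_right (by norm_num)).mp this
  have h2 : b < a + 1 := by
    have := lt_of_le_of_lt hb1 ha2
    exact (Nat.pow_lt_pow_iff_right (by norm_num)).mp this
  omega

theorem pvB_go_spec (p : ℕ) : ∀ d lo hi, hi - lo = d → lo < hi → 3 ^ lo ≤ p → p < 3 ^ hi →
    3 ^ (pvB_go p lo hi) ≤ p ∧ p < 3 ^ (pvB_go p lo hi + 1) := by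
  intro d
  induction d using Nat.strong_induction_on with
  | _ d ih =>
    intro lo hi hd h1 h2 h3
    rw [pvB_go]
    by_cases hgt : hi - lo > 1
    · simp only [hgt, if_true]
      by_cases hc : 3 ^ ((lo + hi) / 2) ≤ p
      · simp only [hc, if_true]
        exact ih (hi - (lo + hi) / 2) (by omega) _ _ rfl (by omega) hc h3
      · simp only [hc, if_false]
        exact ih ((lo + hi) / 2 - lo) (by omega) _ _ rfl (by omega) h2 (not_le.mp hc)
    · simp only [hgt, if_false]
      have hhi : hi = lo + 1 := by omega
      exact ⟨h2, hhi ▸ h3⟩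

-- bridge: for 0 ≤ n the ℚ condition of A's loop is the ℕ comparison with N = n.toNat
theorem pvA_cond (n : Int) (hn : 0 ≤ n) (i : ℕ) :
    ((3 : ℚ) ^ ((i : Int) + 1) > (2 : ℚ) ^ n) ↔ 2 ^ n.toNat < 3 ^ (i + 1) := by
  have h2 : (2 : ℚ) ^ n = ((2 ^ n.toNat : ℕ) : ℚ) := by
    conv_lhs => rw [← Int.toNat_of_nonneg hn]
    rw [zpow_natCast]; push_cast; ring
  have h3 : (3 : ℚ) ^ ((i : Int) + 1) = ((3 ^ (i + 1) : ℕ) : ℚ) := by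
    have : ((i : Int) + 1) = ((i + 1 : ℕ) : ℤ) := by push_cast; ring
    rw [this, zpow_natCast]; push_cast; ring
  rw [h2, h3, gt_iff_lt, Nat.cast_lt]

theorem pvA_loop_spec (n : Int) (hn : 0 ≤ n) : ∀ d (i : ℕ), (n - i).toNat = d →
    3 ^ i ≤ 2 ^ n.toNat →
    ∃ r : ℕ, pvA_loop n i = (r : Int) ∧ 3 ^ r ≤ 2 ^ n.toNat ∧ 2 ^ n.toNat < 3 ^ (r + 1) := by
  intro d
  induction d using Nat.strong_induction_on with
  | _ d ih =>
    intro i hd hi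
    rw [pvA_loop]
    by_cases hc : (3 : ℚ) ^ ((i : Int) + 1) > (2 : ℚ) ^ n
    · simp only [hc, if_true]
      exact ⟨i, rfl, hi, (pvA_cond n hn i).mp hc⟩
    · simp only [hc, if_false]
      have hle : 3 ^ (i + 1) ≤ 2 ^ n.toNat := not_lt.mp ((pvA_cond n hn i).not.mp hc)
      have h2le : 2 ^ (i + 1) ≤ 2 ^ n.toNat :=
        le_trans (Nat.pow_le_pow_left (by norm_num) _) hle
      have hiN : i + 1 ≤ n.toNat := (Nat.pow_le_pow_iff_right (by norm_num)).mp h2le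
      exact ih (n - (i + 1 : ℕ)).toNat (by omega) (i + 1) rfl hle

-- ===== VERDICT (by name: the statement is the Claim_ definition above) =====
theorem get_parameter_count_per_n_bits_py_spec : Claim_equal_get_parameter_count_per_n_bits_py := by
  intro n _
  unfold Spec_get_parameter_count_per_n_bits_py get_parameter_count_per_n_bits_py
    get_parameter_count_per_n_bits_py_alt
  by_cases hn : n < 2
  · simp only [hn, if_true]
    rw [pvA_loop]
    have h2n : (2 : ℚ) ^ n ≤ (2 : ℚ) ^ (1 : ℤ) :=
      zpow_le_zpow_right₀ (by norm_num) (by omega)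
    have hgt : (3 : ℚ) ^ (((0 : ℕ) : Int) + 1) > (2 : ℚ) ^ n := by
      refine lt_of_le_of_lt h2n ?_
      norm_num
    rw [if_pos hgt]; norm_num
  · simp only [hn, if_false]
    have hn0 : 0 ≤ n := by omega
    have hN : 2 ≤ n.toNat := by omega
    obtain ⟨r, hr, hr1, hr2⟩ := pvA_loop_spec n hn0 (n - (0:ℕ)).toNat 0 rfl (by simpa using Nat.one_le_two_pow)
    have hB := pvB_go_spec (2 ^ n.toNat) (n.toNat - 0) 0 n.toNat rfl (by omega)
      (by simpa using Nat.one_le_two_pow) (Nat.pow_lt_pow_left (by norm_num) (by omega))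
    have := pv_uniq (2 ^ n.toNat) r (pvB_go (2 ^ n.toNat) 0 n.toNat) hr1 hr2 hB.1 hB.2
    rw [hr, this]
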